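-- pv_equiv track=rewrite | github.com/tomdif/causal-algebraic-geometry-lean | cag_causal_inference.py | max_antichain_size
-- ===== SOURCE A (Python) =====
-- from itertools import combinations, chain as iterchain
--
-- def max_antichain_size(nodes, closure):
--     """Compute the width: size of the largest antichain (Dilworth's theorem)."""
--     # Brute force for small posets
--     node_list = list(nodes)
--     comparable = set()
--     for (a, b) in closure:
--         comparable.add((a, b))
--         comparable.add((b, a))
--
--     best = 0
--     for r in range(1, len(node_list) + 1):
--         for subset in combinations(node_list, r):
--             is_antichain = True
--             for i in range(len(subset)):
--                 for j in range(i + 1, len(subset)):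
--                     if (subset[i], subset[j]) in comparable:
--                         is_antichain = False
--                         break
--                 if not is_antichain:
--                     break
--             if is_antichain:
--                 best = max(best, r)
--     return best
-- ===== SOURCE B (Python) =====
-- def max_antichain_size(nodes, closure):
--     """Width of the poset: depth-first include/exclude search with pruning."""
--     comparable = set()
--     for (a, b) in closure:
--         comparable.add((a, b))
--         comparable.add((b, a))
--     node_list = list(nodes)
--
--     def go(i, chosen):
--         if i == len(node_list):
--             return len(chosen)
--         best = go(i + 1, chosen)
--         x = node_list[i]
--         if all((x, y) not in comparable for y in chosen):
--             cand = go(i + 1, chosen + [x])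
--             if cand > best:
--                 best = cand
--         return best
--
--     return go(0, [])
-- ===== Notes on version B (the rewrite author's own statement) =====
-- stated objective: alternative
-- what changed: A enumerates every subset of every size via itertools.combinations and re-checks all pairs per subset; B is a single include/exclude depth-first search over the node list that carries the chosen antichain and prunes a branch as soon as a node conflicts with it, checking each new node only against the current partial antichain.
import Mathlib
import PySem

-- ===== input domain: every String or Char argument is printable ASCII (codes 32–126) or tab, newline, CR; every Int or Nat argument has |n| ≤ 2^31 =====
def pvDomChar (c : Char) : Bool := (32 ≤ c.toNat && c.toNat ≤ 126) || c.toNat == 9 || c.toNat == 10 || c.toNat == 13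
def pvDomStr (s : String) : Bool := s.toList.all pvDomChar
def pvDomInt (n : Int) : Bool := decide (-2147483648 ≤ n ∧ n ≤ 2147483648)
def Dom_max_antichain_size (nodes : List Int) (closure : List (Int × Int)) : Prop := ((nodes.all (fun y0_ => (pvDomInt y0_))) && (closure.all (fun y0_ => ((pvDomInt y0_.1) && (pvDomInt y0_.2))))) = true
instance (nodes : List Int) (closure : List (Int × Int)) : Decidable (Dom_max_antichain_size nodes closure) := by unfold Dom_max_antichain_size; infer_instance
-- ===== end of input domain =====

-- B re-implements the brute-force width search as a pruned include/exclude DFS over the node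
-- list (alternative decomposition; same exact value, proved below).

-- ===== PORT A =====
-- shared by both ports: the symmetrised 'comparable' set both Pythons build identically
def pvCompOf (closure : List (Int × Int)) : PySem.Set (Int × Int) :=
  closure.foldl (fun s p => (s.add (p.1, p.2)).add (p.2, p.1)) PySem.Set.empty

-- itertools.combinations(node_list, r) in emission order
def pvCombA : List Int → Nat → List (List Int)
  | _, 0 => [[]]
  | [], _ + 1 => []
  | x :: xs, r + 1 => (pvCombA xs r).map (x :: ·) ++ pvCombA xs (r + 1)

-- the nested i/j loop with breaks: subset is an antichain
def pvAntiA (comp : PySem.Set (Int × Int)) : List Int → Bool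
  | [] => true
  | x :: xs => (xs.all fun y => !(comp.contains (x, y))) && pvAntiA comp xs

def max_antichain_size (nodes : List Int) (closure : List (Int × Int)) : Int :=
  let nodeList := nodes
  let comparable := pvCompOf closure
  (PySem.List.pyRange 1 ((nodeList.length : Int) + 1)).foldl
    (fun best r =>
      (pvCombA nodeList r.toNat).foldl
        (fun best subset => if pvAntiA comparable subset then max best r else best) best) 0

-- ===== PORT B =====
-- go(i, chosen): DFS over the remaining nodes; include x only if compatible with chosen
def pvGoB (comp : PySem.Set (Int × Int)) : List Int → List Int → Int
  | [], chosen => (chosen.length : Int)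
  | x :: rest, chosen =>
    let best := pvGoB comp rest chosen
    if chosen.all fun y => !(comp.contains (x, y)) then
      let cand := pvGoB comp rest (chosen ++ [x])
      if best < cand then cand else best
    else best

def max_antichain_size_alt (nodes : List Int) (closure : List (Int × Int)) : Int :=
  let comparable := pvCompOf closure
  pvGoB comparable nodes []

-- ===== PRECONDITION & SPEC =====
def Spec_max_antichain_size (nodes : List Int) (closure : List (Int × Int)) (out : Int) : Prop := out = max_antichain_size_alt nodes closure
instance (nodes : List Int) (closure : List (Int × Int)) (out : Int) : Decidable (Spec_max_antichain_size nodes closure out) := by unfold Spec_max_antichain_size; infer_instance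

-- ===== CLAIM (what is proved, stated in full; the proofs are below) =====
def Claim_equal_max_antichain_size : Prop := ∀ (nodes : List Int) (closure : List (Int × Int)), Dom_max_antichain_size nodes closure → Spec_max_antichain_size nodes closure (max_antichain_size nodes closure)

-- ===== LEMMAS AND PROOFS =====

-- the symmetrised set really is symmetric
theorem pvCompOf_mem_symm_aux (cl : List (Int × Int)) :
    ∀ (s : PySem.Set (Int × Int)), (∀ a b : Int, (a, b) ∈ s ↔ (b, a) ∈ s) →
      ∀ a b : Int, ((a, b) ∈ cl.foldl (fun s p => (s.add (p.1, p.2)).add (p.2, p.1)) s ↔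
                    (b, a) ∈ cl.foldl (fun s p => (s.add (p.1, p.2)).add (p.2, p.1)) s) := by
  induction cl with
  | nil => intro s hs a b; simpa using hs a b
  | cons p cl ih =>
    intro s hs a b
    refine ih _ ?_ a b
    intro a b
    simp only [PySem.Set.mem_add, Prod.mk.injEq]
    constructor
    · rintro ((h | ⟨rfl, rfl⟩) | ⟨rfl, rfl⟩)
      · exact Or.inl (Or.inl ((hs a b).mp h))
      · exact Or.inr ⟨rfl, rfl⟩
      · exact Or.inl (Or.inr ⟨rfl, rfl⟩)
    · rintro ((h | ⟨rfl, rfl⟩) | ⟨rfl, rfl⟩)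
      · exact Or.inl (Or.inl ((hs b a).mp h))
      · exact Or.inr ⟨rfl, rfl⟩
      · exact Or.inl (Or.inr ⟨rfl, rfl⟩)

theorem pvContains_symm (cl : List (Int × Int)) (a b : Int) :
    (pvCompOf cl).contains (a, b) = (pvCompOf cl).contains (b, a) := by
  have h := pvCompOf_mem_symm_aux cl PySem.Set.empty (by simp [PySem.Set.empty]) a b
  have e : ∀ (s : PySem.Set (Int × Int)) (z : Int × Int),
      PySem.Set.contains s z = decide (z ∈ s) := by
    intro s z; simp [PySem.Set.contains]
  rw [pvCompOf, e, e, decide_eq_decide]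
  exact h

theorem pvAntiA_append_left (comp : PySem.Set (Int × Int)) (s t : List Int)
    (h : pvAntiA comp (s ++ t) = true) : pvAntiA comp s = true := by
  induction s with
  | nil => rfl
  | cons x s ih =>
    simp only [List.cons_append, pvAntiA, List.all_append, Bool.and_eq_true] at h ⊢
    exact ⟨h.1.1, ih h.2⟩

theorem pvAntiA_snoc (comp : PySem.Set (Int × Int)) (ch : List Int) (x : Int) :
    pvAntiA comp (ch ++ [x]) = true ↔
      (pvAntiA comp ch = true ∧ ∀ y ∈ ch, comp.contains (y, x) = false) := by
  induction ch with
  | nil => simp [pvAntiA]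
  | cons z ch ih =>
    simp only [List.cons_append, pvAntiA, List.all_append, Bool.and_eq_true, ih,
      List.all_eq_true, List.all_cons, Bool.not_eq_true', List.mem_cons]
    constructor
    · rintro ⟨⟨h1, h2⟩, h3, h4⟩
      refine ⟨⟨h1, h3⟩, ?_⟩
      rintro y (rfl | hy)
      · simpa using h2
      · exact h4 y hy
    · rintro ⟨⟨h1, h3⟩, h4⟩
      exact ⟨⟨h1, by simpa using h4 z (Or.inl rfl)⟩, h3, fun y hy => h4 y (Or.inr hy)⟩

theorem pvFoldl_max_sup : ∀ (M : List Int) (a b : Int),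
    List.foldl max (max a b) M = max a (List.foldl max b M)
  | [], _, _ => rfl
  | m :: M', a, b => by
    show List.foldl max (max (max a b) m) M' = max a (List.foldl max (max b m) M')
    rw [max_assoc]
    exact pvFoldl_max_sup M' a (max b m)

theorem pvFoldl_max_mem (b : Int) : ∀ (M : List Int), b ∈ M →
    ∀ a, List.foldl max a M = max a (List.foldl max b M)
  | m :: M', hb, a => by
    rcases List.mem_cons.mp hb with rfl | hb'
    · show List.foldl max (max a b) M' = max a (List.foldl max (max b b) M')
      rw [max_self, pvFoldl_max_sup]
    · show List.foldl max (max a m) M' = max a (List.foldl max (max b m) M')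
      rw [pvFoldl_max_mem b M' hb' (max a m), max_comm b m, pvFoldl_max_sup M' m b, ← max_assoc]

theorem pvFoldl_if_max (p : List Int → Bool) (f : List Int → Int) :
    ∀ (L : List (List Int)) (a : Int),
      L.foldl (fun b s => if p s then max b (f s) else b) a =
        List.foldl max a ((L.filter p).map f)
  | [], _ => rfl
  | s :: L, a => by
    cases hp : p s <;>
      simp [hp, pvFoldl_if_max p f L]

theorem pvFoldl_foldl_flatMap {α β γ : Type} (g : α → List β) (f : γ → β → γ) :
    ∀ (L : List α) (init : γ),
      L.foldl (fun acc r => (g r).foldl f acc) init = (L.flatMap g).foldl f init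
  | [], _ => rfl
  | r :: L, init => by
    simp only [List.foldl_cons, List.flatMap_cons, List.foldl_append]
    exact pvFoldl_foldl_flatMap g f L _

theorem pvCombA_length : ∀ (l : List Int) (r : Nat) (s : List Int), s ∈ pvCombA l r → s.length = r
  | _, 0, s, hs => by simp only [pvCombA, List.mem_singleton] at hs; simp [hs]
  | [], _ + 1, s, hs => by simp [pvCombA] at hs
  | x :: xs, r + 1, s, hs => by
    simp only [pvCombA, List.mem_append, List.mem_map] at hs
    rcases hs with ⟨t, ht, rfl⟩ | hs
    · simp [pvCombA_length xs r t ht]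
    · exact pvCombA_length xs (r + 1) s hs

theorem pvCombA_perm : ∀ (l : List Int) (r : Nat), (pvCombA l r).Perm (List.sublistsLen r l)
  | _, 0 => by simp [pvCombA]
  | [], _ + 1 => by simp [pvCombA]
  | x :: xs, r + 1 => by
    rw [List.sublistsLen_succ_cons, pvCombA]
    exact (List.perm_append_comm).trans
      ((pvCombA_perm xs (r + 1)).append ((pvCombA_perm xs r).map _))

theorem pvPerm_flatMap_congr {α β : Type} (f g : α → List β) :
    ∀ (L : List α), (∀ x ∈ L, (f x).Perm (g x)) → (L.flatMap f).Perm (L.flatMap g)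
  | [], _ => by simp
  | x :: L, h => by
    simp only [List.flatMap_cons]
    exact (h x (List.mem_cons_self)).append
      (pvPerm_flatMap_congr f g L fun y hy => h y (List.mem_cons_of_mem _ hy))

theorem pvPyRange_one_map : ∀ n : Nat,
    PySem.List.pyRange 1 ((n : Int) + 1) = (List.range n).map (fun k => ((k + 1 : Nat) : Int))
  | 0 => by decide
  | n + 1 => by
    have h1 : ((n + 1 : Nat) : Int) + 1 = ((n : Int) + 1) + 1 := by push_cast; ring
    rw [h1, PySem.List.pyRange_one_succ_right (by omega), pvPyRange_one_map n, List.range_succ]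
    simp

-- the main B-side invariant: the DFS with accumulator ch computes the best antichain extension
theorem pvGoB_spec (comp : PySem.Set (Int × Int))
    (hs : ∀ a b : Int, comp.contains (a, b) = comp.contains (b, a)) :
    ∀ (l ch : List Int), pvAntiA comp ch = true →
      pvGoB comp l ch = List.foldl max ((ch.length : Int))
        (((l.sublists'.filter (fun t => pvAntiA comp (ch ++ t))).map
            (fun t => ((ch.length + t.length : Nat) : Int)))) := by
  intro l
  induction l with
  | nil =>
    intro ch hch
    simp [pvGoB, List.sublists'_nil, hch]
  | cons x rest ih =>
    intro ch hch
    have hcond : ((fun t => pvAntiA comp (ch ++ t)) ∘ (x :: ·)) =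
        fun t => pvAntiA comp ((ch ++ [x]) ++ t) := by
      funext t
      simp [Function.comp]
    have hRHS : List.foldl max ((ch.length : Int))
        ((((x :: rest).sublists'.filter (fun t => pvAntiA comp (ch ++ t))).map
            (fun t => ((ch.length + t.length : Nat) : Int)))) =
        List.foldl max
          (List.foldl max ((ch.length : Int))
            (((rest.sublists'.filter (fun t => pvAntiA comp (ch ++ t))).map
                (fun t => ((ch.length + t.length : Nat) : Int)))))
          (((rest.sublists'.filter (fun t => pvAntiA comp ((ch ++ [x]) ++ t))).map
              (fun t => (((ch ++ [x]).length + t.length : Nat) : Int)))) := by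
      rw [List.sublists'_cons, List.filter_append, List.map_append, List.foldl_append,
        List.filter_map, hcond, List.map_map]
      congr 1
      apply List.map_congr_left
      intro t _
      simp only [Function.comp, List.length_cons, List.length_append, List.length_nil]
      push_cast
      ring
    by_cases hcompat : (ch.all fun y => !(comp.contains (x, y))) = true
    · have hx : ∀ y ∈ ch, comp.contains (x, y) = false := by
        simpa [List.all_eq_true] using hcompat
      have hsnoc : pvAntiA comp (ch ++ [x]) = true :=
        (pvAntiA_snoc comp ch x).mpr ⟨hch, fun y hy => by rw [hs y x]; exact hx y hy⟩
      have hmem : (((ch ++ [x]).length : Nat) : Int) ∈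
          ((rest.sublists'.filter (fun t => pvAntiA comp ((ch ++ [x]) ++ t))).map
              (fun t => (((ch ++ [x]).length + t.length : Nat) : Int))) := by
        refine List.mem_map.mpr ⟨[], ?_, by simp⟩
        refine List.mem_filter.mpr ⟨?_, by simpa using hsnoc⟩
        exact List.mem_sublists'.mpr (List.nil_sublist rest)
      rw [hRHS, ← ih ch hch, pvFoldl_max_mem _ _ hmem, ← ih (ch ++ [x]) hsnoc]
      simp only [pvGoB, hcompat, if_true]
      rcases lt_or_ge (pvGoB comp rest ch) (pvGoB comp rest (ch ++ [x])) with h | h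
      · simp [h, max_eq_right h.le]
      · simp [not_lt.mpr h, max_eq_left h]
    · obtain ⟨y, hy, hyx⟩ : ∃ y ∈ ch, comp.contains (x, y) = true := by
        by_contra hcon
        simp only [not_exists, not_and, Bool.not_eq_true] at hcon
        exact hcompat (List.all_eq_true.mpr fun y hy => by rw [hcon y hy]; rfl)
      have hsnocf : pvAntiA comp (ch ++ [x]) ≠ true := by
        intro h
        have := ((pvAntiA_snoc comp ch x).mp h).2 y hy
        rw [hs y x] at this
        rw [hyx] at this
        exact Bool.true_eq_false.mp this
      have hfilt : rest.sublists'.filter (fun t => pvAntiA comp ((ch ++ [x]) ++ t)) = [] := by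
        refine List.filter_eq_nil_iff.mpr fun t _ h => ?_
        exact hsnocf (pvAntiA_append_left comp (ch ++ [x]) t h)
      rw [hRHS, hfilt, ← ih ch hch]
      simp only [List.map_nil, List.foldl_nil, pvGoB]
      rw [if_neg hcompat]

-- ===== VERDICT (by name: the statement is the Claim_ definition above) =====
theorem max_antichain_size_spec : Claim_equal_max_antichain_size := by
  intro nodes closure _
  unfold Spec_max_antichain_size
  have hsym : ∀ a b : Int, (pvCompOf closure).contains (a, b) = (pvCompOf closure).contains (b, a) :=
    pvContains_symm closure
  have hB : max_antichain_size_alt nodes closure =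
      List.foldl max 0 ((nodes.sublists'.filter (fun t => pvAntiA (pvCompOf closure) t)).map
        (fun t => (t.length : Int))) := by
    simp only [max_antichain_size_alt]
    rw [pvGoB_spec (pvCompOf closure) hsym nodes [] rfl]
    simp
  have hA : max_antichain_size nodes closure =
      List.foldl max 0
        (((((List.range nodes.length).flatMap (fun k => pvCombA nodes (k + 1))).filter
            (fun t => pvAntiA (pvCompOf closure) t)).map (fun t => (t.length : Int)))) := by
    calc max_antichain_size nodes closure
        = List.foldl
            (fun best r => (pvCombA nodes r.toNat).foldl
              (fun best subset => if pvAntiA (pvCompOf closure) subset then max best r else best) best)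
            0 (PySem.List.pyRange 1 ((nodes.length : Int) + 1)) := by
          simp only [max_antichain_size]
      _ = List.foldl
            (fun best k => (pvCombA nodes (((k + 1 : Nat) : Int)).toNat).foldl
              (fun best subset => if pvAntiA (pvCompOf closure) subset then max best ((k + 1 : Nat) : Int) else best) best)
            0 (List.range nodes.length) := by
          rw [pvPyRange_one_map, List.foldl_map]
      _ = List.foldl
            (fun best k => (pvCombA nodes (k + 1)).foldl
              (fun b s => if pvAntiA (pvCompOf closure) s then max b ((s.length : Int)) else b) best)
            0 (List.range nodes.length) := by
          refine PySem.List.foldl_congr_mem _ _ _ _ ?_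
          intro acc k _
          have ht : (((k + 1 : Nat) : Int)).toNat = k + 1 := by omega
          rw [ht]
          refine PySem.List.foldl_congr_mem _ _ _ _ ?_
          intro acc' s hsm
          rw [pvCombA_length nodes (k + 1) s hsm]
      _ = ((List.range nodes.length).flatMap (fun k => pvCombA nodes (k + 1))).foldl
            (fun b s => if pvAntiA (pvCompOf closure) s then max b ((s.length : Int)) else b) 0 :=
          pvFoldl_foldl_flatMap _ _ _ _
      _ = _ := pvFoldl_if_max _ _ _ _
  have hp1 : (([([] : List Int)]) ++
      (List.range nodes.length).flatMap (fun k => pvCombA nodes (k + 1))).Perm nodes.sublists' := by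
    have h2 := List.range_bind_sublistsLen_perm nodes
    have h3 : (List.range (nodes.length + 1)).flatMap (fun m => List.sublistsLen m nodes) =
        [([] : List Int)] ++ (List.range nodes.length).flatMap (fun k => List.sublistsLen (k + 1) nodes) := by
      rw [List.range_succ_eq_map, List.flatMap_cons, List.flatMap_map]
      simp
    have h4 := pvPerm_flatMap_congr (fun k => pvCombA nodes (k + 1))
      (fun k => List.sublistsLen (k + 1) nodes) (List.range nodes.length)
      (fun k _ => pvCombA_perm nodes (k + 1))
    rw [h3] at h2
    exact ((List.Perm.refl [([] : List Int)]).append h4).trans h2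
  rw [hA, hB]
  have e1 : ((([([] : List Int)]) ++
        (List.range nodes.length).flatMap (fun k => pvCombA nodes (k + 1))).filter
          (fun t => pvAntiA (pvCompOf closure) t)).map (fun t => (t.length : Int)) =
      0 :: ((((List.range nodes.length).flatMap (fun k => pvCombA nodes (k + 1))).filter
          (fun t => pvAntiA (pvCompOf closure) t)).map (fun t => (t.length : Int))) := by
    simp [pvAntiA]
  have hperm := ((hp1.filter (fun t => pvAntiA (pvCompOf closure) t)).map
      (fun t => (t.length : Int))).foldl_eq (f := max) 0
  rw [← hperm, e1]
  simp
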